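-- pv_equiv track=rewrite | github.com/sinerslb/algorithms | nearest_null.py | nearest_null
-- ===== SOURCE A (Python) =====
-- from typing import List
--
-- def nearest_null(houses: List[int], num_houses: int) -> List[int]:
--     """Расчёт расстояния до ближайшего пустого участка."""
--
--     # определяем и фиксируем позиции '0'
--     no_houses: List[int] = [i for i in range(num_houses) if houses[i] == 0]
--     null_first: int = no_houses[0]
--     null_last: int = no_houses[0] if len(no_houses) == 1 else no_houses[1]
--
--     # определяем дистанции на отрезке до первого ноля
--     for i in range(null_first):
--         houses[i] = null_first-i
--
--     # определяем дистанции на всех отрезках между парами нолей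
--     n_next: int = 1
--     for i in range(null_first+1, no_houses[-1]):
--         if houses[i]:
--             houses[i] = min(i - null_first, null_last - i)
--         else:
--             n_next += 1
--             null_first = null_last
--             null_last = no_houses[n_next]
--
--     # определяем дистанции на отрезке после последнего ноля
--     for i in range(null_last+1, num_houses):
--         houses[i] = i - null_last
--
--     return houses
-- ===== SOURCE B (Python) =====
-- from typing import List
--
-- def nearest_null(houses: List[int], num_houses: int) -> List[int]:
--     """Расчёт расстояния до ближайшего пустого участка."""
--     # brute force: for each plot take the minimum distance over all empty plots
--     zeros = [i for i in range(num_houses) if houses[i] == 0]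
--     if not zeros:
--         raise IndexError('no empty plot to measure from')
--     houses[:num_houses] = [min(abs(i - z) for z in zeros) for i in range(num_houses)]
--     return houses
-- ===== Notes on version B (the rewrite author's own statement) =====
-- stated objective: simpler
-- what changed: A's single sweep with paired zero-pointers and three fill phases is replaced by collecting the zero positions once and taking, for every plot, the minimum |i-z| over all zeros in one comprehension.
import Mathlib
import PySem

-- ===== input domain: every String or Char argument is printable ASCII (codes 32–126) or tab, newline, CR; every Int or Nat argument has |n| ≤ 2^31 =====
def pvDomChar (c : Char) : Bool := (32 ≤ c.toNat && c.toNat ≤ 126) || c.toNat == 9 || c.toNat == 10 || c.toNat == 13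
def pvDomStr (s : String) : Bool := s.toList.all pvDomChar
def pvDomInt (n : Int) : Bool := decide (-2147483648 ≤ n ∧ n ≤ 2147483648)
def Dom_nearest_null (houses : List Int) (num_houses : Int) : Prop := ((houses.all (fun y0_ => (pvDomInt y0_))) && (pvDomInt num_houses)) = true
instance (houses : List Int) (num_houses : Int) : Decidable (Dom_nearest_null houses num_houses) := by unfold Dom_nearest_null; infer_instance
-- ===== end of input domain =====

-- B replaces A's paired-pointer sweep by a per-plot minimum over the zero positions (simpler);
-- both mutate `houses` in place in Python and return it, the equivalence proved is about the returned value.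

-- ===== PORT A =====
-- A-side helpers: the write loop `for i in range(s, e): houses[i] = f(i)` and one
-- iteration of A's middle loop over the state (houses, n_next, null_first, null_last)
def wrFold (f : Int → Int) (s e : Int) (L : List Int) : List Int :=
  (PySem.List.pyRange s e).foldl (fun L i => PySem.List.pySetD L i (f i)) L

def midStep (nos : List Int) (st : List Int × Int × Int × Int) (i : Int) :
    List Int × Int × Int × Int :=
  if PySem.List.pyGetD st.1 i 0 ≠ 0 then
    (PySem.List.pySetD st.1 i (min (i - st.2.2.1) (st.2.2.2 - i)), st.2.1, st.2.2.1, st.2.2.2)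
  else
    (st.1, st.2.1 + 1, st.2.2.2, PySem.List.pyGetD nos (st.2.1 + 1) 0)

def nearest_null (houses : List Int) (num_houses : Int) : List Int :=
  let no_houses : List Int :=
    (PySem.List.pyRange 0 num_houses 1).filter (fun i => PySem.List.pyGetD houses i 1 == 0)
  let null_first : Int := PySem.List.pyGetD no_houses 0 0
  let null_last : Int := if no_houses.length == 1 then null_first else PySem.List.pyGetD no_houses 1 0
  -- for i in range(null_first): houses[i] = null_first - i
  let houses1 : List Int := wrFold (fun i => null_first - i) 0 null_first houses
  -- for i in range(null_first+1, no_houses[-1]): …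
  let st : List Int × Int × Int × Int :=
    (PySem.List.pyRange (null_first + 1) (PySem.List.pyGetD no_houses (-1) 0) 1).foldl
      (midStep no_houses) (houses1, 1, null_first, null_last)
  -- for i in range(null_last+1, num_houses): houses[i] = i - null_last
  wrFold (fun i => i - st.2.2.2) (st.2.2.2 + 1) num_houses st.1

-- ===== PORT B =====
-- min(abs(i - z) for z in zeros)
def py_min_abs (i : Int) (zs : List Int) : Int :=
  (PySem.List.min? (zs.map (fun z => |i - z|)) (fun y => y)).getD 0

def nearest_null_alt (houses : List Int) (num_houses : Int) : List Int :=
  let zeros : List Int :=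
    (PySem.List.pyRange 0 num_houses 1).filter (fun i => PySem.List.pyGetD houses i 1 == 0)
  if zeros = [] then []  -- 'raise IndexError': no value; unreachable under Pre_
  else
    -- houses[:num_houses] = [min(abs(i - z) for z in zeros) for i in range(num_houses)]; return houses
    ((PySem.List.pyRange 0 num_houses 1).map (fun i => py_min_abs i zeros))
      ++ PySem.List.slice houses (some num_houses) none

-- ===== PRECONDITION & SPEC =====
-- Pre_ is exactly where Python A returns: num_houses within the list length and at
-- least one zero among the first num_houses entries (otherwise A raises IndexError).
def Pre_nearest_null (houses : List Int) (num_houses : Int) : Prop :=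
  num_houses.toNat ≤ houses.length ∧ (0 : Int) ∈ houses.take num_houses.toNat
instance (houses : List Int) (num_houses : Int) : Decidable (Pre_nearest_null houses num_houses) := by
  unfold Pre_nearest_null; infer_instance
def pvWitness_nearest_null : List Int × Int := ([1, 0, 2], 3)

def Spec_nearest_null (houses : List Int) (num_houses : Int) (out : List Int) : Prop :=
  out = nearest_null_alt houses num_houses
instance (houses : List Int) (num_houses : Int) (out : List Int) : Decidable (Spec_nearest_null houses num_houses out) := by
  unfold Spec_nearest_null; infer_instance

-- ===== CLAIM (what is proved, stated in full; the proofs are below) =====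
def Claim_equal_nearest_null : Prop := ∀ (houses : List Int) (num_houses : Int), Dom_nearest_null houses num_houses → Pre_nearest_null houses num_houses → Spec_nearest_null houses num_houses (nearest_null houses num_houses)

-- ===== LEMMAS AND PROOFS =====

theorem wrFold_length (f : Int → Int) (s e : Int) (L : List Int) :
    (wrFold f s e L).length = L.length := by
  have key : ∀ m : Nat, ∀ s L, (e - s).toNat = m → (wrFold f s e L).length = L.length := by
    intro m
    induction m with
    | zero =>
      intro s L hm
      rw [wrFold, PySem.List.pyRange_one_eq_nil (by omega)]
      rfl
    | succ n ih =>
      intro s L hm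
      rw [wrFold, PySem.List.pyRange_one_cons (by omega)]
      simp only [List.foldl_cons]
      have h2 := ih (s + 1) (PySem.List.pySetD L s (f s)) (by omega)
      rw [wrFold] at h2
      rw [h2, PySem.List.length_pySetD]
  exact key _ s L rfl

theorem wrFold_out (f : Int → Int) (s e : Int) (L : List Int) (k : Nat)
    (hs : 0 ≤ s) (hk : (k : Int) < s ∨ e ≤ (k : Int)) :
    (wrFold f s e L)[k]? = L[k]? := by
  have key : ∀ m : Nat, ∀ s L, 0 ≤ s → ((k : Int) < s ∨ e ≤ (k : Int)) → (e - s).toNat = m →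
      (wrFold f s e L)[k]? = L[k]? := by
    intro m
    induction m with
    | zero =>
      intro s L hs hk hm
      rw [wrFold, PySem.List.pyRange_one_eq_nil (by omega)]
      rfl
    | succ n ih =>
      intro s L hs hk hm
      rw [wrFold, PySem.List.pyRange_one_cons (by omega)]
      simp only [List.foldl_cons]
      have h2 := ih (s + 1) (PySem.List.pySetD L s (f s)) (by omega) (by omega) (by omega)
      rw [wrFold] at h2
      rw [h2, PySem.List.pySetD_of_nonneg _ _ hs, List.getElem?_set_ne (by omega)]
  exact key _ s L hs hk rfl

theorem wrFold_in (f : Int → Int) (s e : Int) (L : List Int) (k : Nat)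
    (hs : 0 ≤ s) (h1 : s ≤ (k : Int)) (h2 : (k : Int) < e) (hlen : k < L.length) :
    (wrFold f s e L)[k]? = some (f k) := by
  have key : ∀ m : Nat, ∀ s L, 0 ≤ s → s ≤ (k : Int) → k < L.length → (e - s).toNat = m →
      (wrFold f s e L)[k]? = some (f k) := by
    intro m
    induction m with
    | zero =>
      intro s L hs h1 hlen hm
      omega
    | succ n ih =>
      intro s L hs h1 hlen hm
      rw [wrFold, PySem.List.pyRange_one_cons (by omega)]
      simp only [List.foldl_cons]
      by_cases hk : s = (k : Int)
      · have hout : ((PySem.List.pyRange (s + 1) e).foldl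
            (fun L i => PySem.List.pySetD L i (f i)) (PySem.List.pySetD L s (f s)))[k]?
              = (PySem.List.pySetD L s (f s))[k]? :=
          wrFold_out f (s + 1) e _ k (by omega) (by omega)
        rw [hout, PySem.List.pySetD_of_nonneg _ _ hs]
        have hks : s.toNat = k := by omega
        rw [hks, List.getElem?_set_self' ]
        simp [hlen, ← hk]
      · have h2 := ih (s + 1) (PySem.List.pySetD L s (f s)) (by omega) (by omega)
          (by rw [PySem.List.length_pySetD]; exact hlen) (by omega)
        rw [wrFold] at h2
        rw [h2]
  exact key _ s L hs h1 hlen rfl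

-- sorted-list order facts
theorem pv_head_le (x : Int) (xs : List Int) (hp : (x :: xs).Pairwise (· < ·)) :
    ∀ y ∈ x :: xs, x ≤ y := by
  intro y hy
  rcases List.mem_cons.1 hy with h | h
  · omega
  · exact le_of_lt ((List.pairwise_cons.1 hp).1 y h)

theorem pv_le_getLast (l : List Int) (h : l ≠ []) (hp : l.Pairwise (· < ·)) :
    ∀ y ∈ l, y ≤ l.getLast h := by
  revert h hp
  induction l with
  | nil => intro h hp; exact absurd rfl h
  | cons x t ih =>
    intro h hp y hy
    cases t with
    | nil =>
      simp at hy
      simp [hy]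
    | cons b t2 =>
      rw [List.getLast_cons (by simp)]
      rcases List.mem_cons.1 hy with h1 | h1
      · subst h1
        calc y ≤ b := le_of_lt ((List.pairwise_cons.1 hp).1 b (by simp))
          _ ≤ (b :: t2).getLast (by simp) := ih (by simp) (List.pairwise_cons.1 hp).2 b (by simp)
      · exact ih (by simp) (List.pairwise_cons.1 hp).2 y h1

-- A's middle phase as a recursion over the zero positions: fill each open segment
def fillSeg : Int → List Int → List Int → List Int
  | _, [], L => L
  | a, b :: zt, L =>
      fillSeg b zt (wrFold (fun i => min (i - a) (b - i)) (a + 1) b L)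

theorem fillSeg_length (zt : List Int) (a : Int) (L : List Int) :
    (fillSeg a zt L).length = L.length := by
  induction zt generalizing a L with
  | nil => rfl
  | cons b zt ih =>
    rw [fillSeg, ih, wrFold_length]

theorem fillSeg_out (zt : List Int) (a : Int) (L : List Int) (k : Nat)
    (hp : (a :: zt).Pairwise (· < ·)) (ha : 0 ≤ a)
    (hk : (k : Int) ≤ a ∨ (a :: zt).getLast (by simp) ≤ (k : Int) ∨ (k : Int) ∈ a :: zt) :
    (fillSeg a zt L)[k]? = L[k]? := by
  induction zt generalizing a L with
  | nil => rfl
  | cons b zt ih =>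
    rw [fillSeg]
    have hab : a < b := (List.pairwise_cons.1 hp).1 b (by simp)
    have hbl : (b :: zt).Pairwise (· < ·) := (List.pairwise_cons.1 hp).2
    have hble : b ≤ (b :: zt).getLast (by simp) := pv_le_getLast _ (by simp) hbl b (by simp)
    have hlast : (a :: b :: zt).getLast (by simp) = (b :: zt).getLast (by simp) := by
      rw [List.getLast_cons (by simp)]
    have hk' : (k : Int) ≤ b ∨ (b :: zt).getLast (by simp) ≤ (k : Int) ∨ (k : Int) ∈ b :: zt := by
      rcases hk with h | h | h
      · exact Or.inl (by omega)
      · exact Or.inr (Or.inl (by rw [hlast] at h; exact h))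
      · rcases List.mem_cons.1 h with h1 | h1
        · exact Or.inl (by omega)
        · exact Or.inr (Or.inr h1)
    have hw : (wrFold (fun i => min (i - a) (b - i)) (a + 1) b L)[k]? = L[k]? := by
      apply wrFold_out _ _ _ _ _ (by omega)
      rcases hk' with h | h | h
      · rcases eq_or_lt_of_le h with h1 | h1
        · exact Or.inr (by omega)
        · -- k < b : must show k < a+1 ∨ b ≤ k; since k ≤ a or k ∈ …
          rcases hk with h2 | h2 | h2
          · exact Or.inl (by omega)
          · rw [hlast] at h2; omega
          · rcases List.mem_cons.1 h2 with h3 | h3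
            · exact Or.inl (by omega)
            · have := pv_head_le b zt hbl _ h3; omega
      · omega
      · have := pv_head_le b zt hbl _ h; omega
    rw [ih b _ hbl (by omega) hk', hw]

theorem fillSeg_in (zt : List Int) (a : Int) (L : List Int) (k : Nat)
    (hp : (a :: zt).Pairwise (· < ·)) (ha : 0 ≤ a) (hlen : k < L.length)
    (h1 : a < (k : Int)) (h2 : (k : Int) < (a :: zt).getLast (by simp))
    (h3 : (k : Int) ∉ a :: zt) :
    ∃ p q : Int, p ∈ a :: zt ∧ q ∈ a :: zt ∧ p < (k : Int) ∧ (k : Int) < q ∧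
      (fillSeg a zt L)[k]? = some (min ((k : Int) - p) (q - (k : Int))) ∧
      (∀ z ∈ a :: zt, z ≤ p ∨ q ≤ z) := by
  induction zt generalizing a L with
  | nil => simp at h2; omega
  | cons b zt ih =>
    rw [fillSeg]
    have hab : a < b := (List.pairwise_cons.1 hp).1 b (by simp)
    have hbl : (b :: zt).Pairwise (· < ·) := (List.pairwise_cons.1 hp).2
    have hlast : (a :: b :: zt).getLast (by simp) = (b :: zt).getLast (by simp) := by
      rw [List.getLast_cons (by simp)]
    by_cases hkb : (k : Int) < b
    · refine ⟨a, b, by simp, by simp, h1, hkb, ?_, ?_⟩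
      · rw [fillSeg_out zt b _ k hbl (by omega) (Or.inl (le_of_lt hkb))]
        exact wrFold_in _ _ _ _ _ (by omega) (by omega) hkb hlen
      · intro z hz
        rcases List.mem_cons.1 hz with h | h
        · exact Or.inl (le_of_eq h)
        · rcases List.mem_cons.1 h with h4 | h4
          · exact Or.inr (le_of_eq h4.symm)
          · exact Or.inr (pv_head_le b zt hbl _ (List.mem_cons_of_mem b h4))
    · have hkb' : b < (k : Int) := by
        have : (k : Int) ≠ b := fun hc => h3 (by rw [hc]; simp)
        omega
      obtain ⟨p, q, hp1, hq1, hpk, hkq, hval, hbound⟩ :=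
        ih b (wrFold (fun i => min (i - a) (b - i)) (a + 1) b L) hbl (by omega)
          (by rw [wrFold_length]; exact hlen) hkb' (by rw [hlast] at h2; exact h2)
          (fun hc => h3 (List.mem_cons_of_mem a hc))
      refine ⟨p, q, List.mem_cons_of_mem a hp1, List.mem_cons_of_mem a hq1, hpk, hkq, hval, ?_⟩
      intro z hz
      rcases List.mem_cons.1 hz with h | h
      · have hbp : b ≤ p := pv_head_le b zt hbl _ hp1
        exact Or.inl (by omega)
      · exact hbound z h

theorem wrFold_pyGetD_out (f : Int → Int) (s e : Int) (L : List Int) (j : Int)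
    (hs : 0 ≤ s) (hj : 0 ≤ j) (hk : j < s ∨ e ≤ j) :
    PySem.List.pyGetD (wrFold f s e L) j 0 = PySem.List.pyGetD L j 0 := by
  rw [PySem.List.pyGetD_of_nonneg _ _ hj, PySem.List.pyGetD_of_nonneg _ _ hj,
    List.getD_eq_getElem?_getD, List.getD_eq_getElem?_getD,
    wrFold_out f s e L j.toNat hs (by omega)]

-- a stretch of the middle loop that meets no zero is a pure write loop
theorem segW (nos : List Int) (s e : Int) (L : List Int) (nn nf nl : Int)
    (hs : 0 ≤ s)
    (hnz : ∀ i : Int, s ≤ i → i < e → PySem.List.pyGetD L i 0 ≠ 0) :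
    (PySem.List.pyRange s e).foldl (midStep nos) (L, nn, nf, nl)
      = (wrFold (fun i => min (i - nf) (nl - i)) s e L, nn, nf, nl) := by
  have key : ∀ m : Nat, ∀ s L, 0 ≤ s →
      (∀ i : Int, s ≤ i → i < e → PySem.List.pyGetD L i 0 ≠ 0) → (e - s).toNat = m →
      (PySem.List.pyRange s e).foldl (midStep nos) (L, nn, nf, nl)
        = (wrFold (fun i => min (i - nf) (nl - i)) s e L, nn, nf, nl) := by
    intro m
    induction m with
    | zero =>
      intro s L hs hnz hm
      simp [wrFold, PySem.List.pyRange_one_eq_nil (show e ≤ s by omega)]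
    | succ n ih =>
      intro s L hs hnz hm
      rw [wrFold, PySem.List.pyRange_one_cons (by omega)]
      simp only [List.foldl_cons]
      have hstep : midStep nos (L, nn, nf, nl) s
          = (PySem.List.pySetD L s (min (s - nf) (nl - s)), nn, nf, nl) := by
        simp [midStep, hnz s le_rfl (by omega)]
      rw [hstep]
      have hz : ∀ i : Int, s + 1 ≤ i → i < e →
          PySem.List.pyGetD (PySem.List.pySetD L s (min (s - nf) (nl - s))) i 0 ≠ 0 := by
        intro i h1 h2
        have hne := hnz i (by omega) h2
        rw [PySem.List.pySetD_of_nonneg _ _ hs,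
          PySem.List.pyGetD_of_nonneg _ _ (by omega : (0:Int) ≤ i),
          List.getD_eq_getElem?_getD, List.getElem?_set_ne (by omega)]
        rw [PySem.List.pyGetD_of_nonneg _ _ (by omega : (0:Int) ≤ i),
          List.getD_eq_getElem?_getD] at hne
        exact hne
      have h2 := ih (s + 1) (PySem.List.pySetD L s (min (s - nf) (nl - s))) (by omega) hz (by omega)
      rw [h2, wrFold]
  exact key _ s L hs hnz rfl

theorem midFold (zt pre : List Int) (a nl : Int) (L : List Int) (nos : List Int)
    (hnos : nos = pre ++ a :: nl :: zt)
    (hp : nos.Pairwise (· < ·)) (ha : 0 ≤ a)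
    (hL : ∀ i : Int, a < i → i ≤ (nl :: zt).getLast (by simp) →
            (PySem.List.pyGetD L i 0 = 0 ↔ i ∈ nl :: zt)) :
    ∃ x y : Int,
      (PySem.List.pyRange (a + 1) ((nl :: zt).getLast (by simp))).foldl (midStep nos)
          (L, (pre.length : Int) + 1, a, nl)
        = (fillSeg a (nl :: zt) L, x, y, (nl :: zt).getLast (by simp)) := by
  induction zt generalizing pre a nl L with
  | nil =>
    refine ⟨(pre.length : Int) + 1, a, ?_⟩
    simp only [List.getLast_singleton]
    have hseg := segW nos (a + 1) nl L ((pre.length : Int) + 1) a nl (by omega) ?_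
    · rw [hseg]; rfl
    · intro i h1 h2
      have hiff := hL i (by omega) (by simp only [List.getLast_singleton]; omega)
      intro hc
      have : i ∈ [nl] := (hiff.1 hc)
      simp at this
      omega
  | cons c zt' ih =>
    have hq : (a :: nl :: c :: zt').Pairwise (· < ·) := by
      have := hnos ▸ hp
      exact (List.pairwise_append.1 this).2.1
    have hanl : a < nl := (List.pairwise_cons.1 hq).1 nl (by simp)
    have hq2 : (nl :: c :: zt').Pairwise (· < ·) := (List.pairwise_cons.1 hq).2
    have hnlc : nl < c := (List.pairwise_cons.1 hq2).1 c (by simp)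
    have hq3 : (c :: zt').Pairwise (· < ·) := (List.pairwise_cons.1 hq2).2
    have hcG : c ≤ (c :: zt').getLast (by simp) := pv_le_getLast _ (by simp) hq3 c (by simp)
    have hlast : (nl :: c :: zt').getLast (by simp) = (c :: zt').getLast (by simp) := by
      rw [List.getLast_cons (by simp)]
    rw [hlast]
    rw [PySem.List.pyRange_one_append (a + 1) nl ((c :: zt').getLast (by simp)) (by omega) (by omega),
      PySem.List.pyRange_one_cons (show nl < (c :: zt').getLast (by simp) by omega),
      List.foldl_append, List.foldl_cons]
    have hnz1 : ∀ i : Int, a + 1 ≤ i → i < nl → PySem.List.pyGetD L i 0 ≠ 0 := by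
      intro i h1 h2 hc0
      have hiff := hL i (by omega) (by rw [hlast]; have := pv_le_getLast _ (by simp : (nl :: c :: zt') ≠ []) hq2 nl (by simp); omega)
      have hmem := hiff.1 hc0
      rcases List.mem_cons.1 hmem with h | h
      · omega
      · have := pv_head_le c zt' hq3 _ h; omega
    rw [segW nos (a + 1) nl L ((pre.length : Int) + 1) a nl (by omega) hnz1]
    set W := wrFold (fun i => min (i - a) (nl - i)) (a + 1) nl L with hW
    have hWnl : PySem.List.pyGetD W nl 0 = 0 := by
      rw [hW, wrFold_pyGetD_out _ _ _ _ nl (by omega) (by omega) (Or.inr le_rfl)]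
      exact (hL nl (by omega) (by have := pv_le_getLast _ (by simp : (nl :: c :: zt') ≠ []) hq2 nl (by simp); omega)).2 (by simp)
    have hstep : midStep nos (W, (pre.length : Int) + 1, a, nl) nl
        = (W, (pre.length : Int) + 1 + 1, nl, PySem.List.pyGetD nos ((pre.length : Int) + 1 + 1) 0) := by
      simp [midStep, hWnl]
    rw [hstep]
    have hc : PySem.List.pyGetD nos ((pre.length : Int) + 1 + 1) 0 = c := by
      have hcast : (pre.length : Int) + 1 + 1 = ((pre.length + 2 : Nat) : Int) := by push_cast; ring
      rw [hnos, hcast, PySem.List.pyGetD_natCast, List.getD_eq_getElem?_getD,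
        List.getElem?_append_right (by omega)]
      have h2 : pre.length + 2 - pre.length = 2 := by omega
      rw [h2]
      rfl
    rw [hc]
    have hL' : ∀ i : Int, nl < i → i ≤ (c :: zt').getLast (by simp) →
        (PySem.List.pyGetD W i 0 = 0 ↔ i ∈ c :: zt') := by
      intro i h1 h2
      rw [hW, wrFold_pyGetD_out _ _ _ _ i (by omega) (by omega) (Or.inr (by omega))]
      have hiff := hL i (by omega) (by rw [hlast]; exact h2)
      rw [hiff]
      constructor
      · intro h; rcases List.mem_cons.1 h with h3 | h3
        · omega
        · exact h3
      · intro h; exact List.mem_cons_of_mem nl h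
    have hcast2 : ((pre ++ [a]).length : Int) + 1 = (pre.length : Int) + 1 + 1 := by
      simp
    obtain ⟨x, y, hrec⟩ := ih (pre ++ [a]) nl c W (by rw [hnos]; simp) (by omega) hL'
    refine ⟨x, y, ?_⟩
    rw [hcast2] at hrec
    rw [hrec]
    rfl

-- characterization of Python's min(|j - z| for z in zs)
theorem py_min_abs_spec (j v : Int) (zs : List Int) (hne : zs ≠ [])
    (hmem : ∃ z ∈ zs, |j - z| = v) (hle : ∀ z ∈ zs, v ≤ |j - z|) :
    py_min_abs j zs = v := by
  cases zs with
  | nil => exact absurd rfl hne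
  | cons x t =>
    rw [py_min_abs, List.map_cons, PySem.List.min?_id_cons, Option.getD_some]
    have hle1 := PySem.List.foldl_min_le (t.map (fun z => |j - z|)) (|j - x|)
    have hmem1 := PySem.List.foldl_min_mem (t.map (fun z => |j - z|)) (|j - x|)
    set R := (t.map (fun z => |j - z|)).foldl min (|j - x|) with hR
    have hvR : v ≤ R := by
      rcases hmem1 with h | h
      · rw [h]; exact hle x (by simp)
      · obtain ⟨z, hz, hfz⟩ := List.mem_map.1 h
        rw [← hfz]; exact hle z (List.mem_cons_of_mem x hz)
    have hRv : R ≤ v := by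
      obtain ⟨z, hz, hfz⟩ := hmem
      rcases List.mem_cons.1 hz with h | h
      · subst h; rw [← hfz]; exact hle1.1
      · rw [← hfz]; exact hle1.2 _ (List.mem_map.2 ⟨z, h, rfl⟩)
    omega


theorem pyGetD_neg_one (xs : List Int) (h : xs ≠ []) (d : Int) :
    PySem.List.pyGetD xs (-1) d = xs.getLast h := by
  have hl : 0 < xs.length := List.length_pos_iff.2 h
  rw [PySem.List.pyGetD, PySem.List.pyGet?, PySem.List.pyIdx?]
  rw [if_neg (by omega), if_pos (by omega)]
  have h1 : xs.length - (-(-1 : Int)).toNat = xs.length - 1 := by omega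
  rw [h1]
  simp only [Option.bind_some]
  rw [List.getElem?_eq_getElem (by omega), Option.getD_some, List.getLast_eq_getElem]

-- ===== VERDICT (by name: the statement is the Claim_ definition above) =====
theorem nearest_null_spec : Claim_equal_nearest_null := by
  intro houses num_houses hdom hpre
  obtain ⟨hlen, hmem0⟩ := hpre
  unfold Spec_nearest_null
  have hn0 : 0 < num_houses := by
    by_contra h
    have h0 : num_houses.toNat = 0 := by omega
    rw [h0] at hmem0
    simp at hmem0
  set t : Nat := num_houses.toNat with ht
  have hnum : num_houses = (t : Int) := by omega
  have hnle : num_houses ≤ (houses.length : Int) := by omega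
  set zs : List Int :=
    (PySem.List.pyRange 0 num_houses 1).filter (fun i => PySem.List.pyGetD houses i 1 == 0)
    with hzsdef
  have hchain : zs.Pairwise (· < ·) :=
    (PySem.List.pairwise_lt_pyRange_one 0 num_houses).filter _
  have hmemz : ∀ i : Int,
      i ∈ zs ↔ 0 ≤ i ∧ i < num_houses ∧ PySem.List.pyGetD houses i 1 = 0 := by
    intro i
    rw [hzsdef, List.mem_filter, PySem.List.mem_pyRange_one]
    simp [and_assoc]
  have hne : zs ≠ [] := by
    obtain ⟨k, hk, hkv⟩ := List.mem_iff_getElem.1 hmem0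
    have hkt : k < t := by
      simp [List.length_take] at hk
      omega
    refine List.ne_nil_of_mem (a := (k : Int)) ?_
    rw [hmemz]
    refine ⟨by omega, by omega, ?_⟩
    rw [PySem.List.pyGetD_natCast, List.getD_eq_getElem?_getD,
      List.getElem?_eq_getElem (by omega : k < houses.length), Option.getD_some]
    rw [List.getElem_take] at hkv
    exact hkv
  obtain ⟨z0, zt, hzs⟩ : ∃ z0 zt, zs = z0 :: zt := by
    cases hc : zs with
    | nil => exact absurd hc hne
    | cons a b => exact ⟨a, b, rfl⟩
  have hchain' : (z0 :: zt).Pairwise (· < ·) := hzs ▸ hchain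
  have hz0mem : z0 ∈ zs := by rw [hzs]; simp
  have h0z0 : 0 ≤ z0 := ((hmemz z0).1 hz0mem).1
  have hz0num : z0 < num_houses := ((hmemz z0).1 hz0mem).2.1
  set G : Int := (z0 :: zt).getLast (by simp) with hG
  have hGmem : G ∈ zs := by rw [hzs, hG]; exact List.getLast_mem _
  have h0G : 0 ≤ G := ((hmemz G).1 hGmem).1
  have hGnum : G < num_houses := ((hmemz G).1 hGmem).2.1
  have hzG : ∀ z ∈ zs, z ≤ G := by
    intro z hz
    exact pv_le_getLast (z0 :: zt) (by simp) hchain' z (hzs ▸ hz)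
  have hz0le : ∀ z ∈ zs, z0 ≤ z := by
    intro z hz
    exact pv_head_le z0 zt hchain' z (hzs ▸ hz)
  have hvalz : ∀ z : Int, z ∈ zs → houses[z.toNat]? = some 0 := by
    intro z hz
    obtain ⟨hz1, hz2, hz3⟩ := (hmemz z).1 hz
    rw [PySem.List.pyGetD_eq_getElem houses 1 hz1 (by omega)] at hz3
    rw [List.getElem?_eq_getElem (by omega : z.toNat < houses.length), hz3]
  -- shape of port A
  set W0 : List Int := wrFold (fun i => z0 - i) 0 z0 houses with hW0
  have hA : nearest_null houses num_houses
      = wrFold (fun i => i - G) (G + 1) num_houses (fillSeg z0 zt W0) := by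
    simp only [nearest_null]
    rw [← hzsdef, hzs]
    have e1 : PySem.List.pyGetD (z0 :: zt) 0 0 = z0 := by
      rw [PySem.List.pyGetD_ofNat']
      rfl
    have e2 : PySem.List.pyGetD (z0 :: zt) (-1) 0 = G := by
      rw [pyGetD_neg_one (z0 :: zt) (by simp) 0, hG]
    rw [e1, e2]
    cases zt with
    | nil =>
      have hG0 : G = z0 := by rw [hG]; rfl
      rw [if_pos (by rfl)]
      rw [PySem.List.pyRange_one_eq_nil (by omega : G ≤ z0 + 1)]
      simp only [List.foldl_nil]
      rw [hG0]
      rfl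
    | cons c zt' =>
      rw [if_neg (by simp)]
      have e3 : PySem.List.pyGetD (z0 :: c :: zt') 1 0 = c := by
        rw [PySem.List.pyGetD_ofNat']
        rfl
      rw [e3]
      have hGc : G = (c :: zt').getLast (by simp) := by
        rw [hG, List.getLast_cons (by simp)]
      have hL1 : ∀ i : Int, z0 < i → i ≤ (c :: zt').getLast (by simp) →
          (PySem.List.pyGetD W0 i 0 = 0 ↔ i ∈ c :: zt') := by
        intro i h1 h2
        rw [hW0, wrFold_pyGetD_out _ _ _ _ i le_rfl (by omega) (Or.inr (by omega))]
        have hiG : i ≤ G := by omega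
        have hbridge : PySem.List.pyGetD houses i 0 = PySem.List.pyGetD houses i 1 := by
          rw [PySem.List.pyGetD_eq_getElem houses 0 (by omega) (by omega),
            PySem.List.pyGetD_eq_getElem houses 1 (by omega) (by omega)]
        rw [hbridge]
        constructor
        · intro hv
          have : i ∈ zs := (hmemz i).2 ⟨by omega, by omega, hv⟩
          rw [hzs] at this
          rcases List.mem_cons.1 this with h3 | h3
          · omega
          · exact h3
        · intro hmem
          exact ((hmemz i).1 (by rw [hzs]; exact List.mem_cons_of_mem z0 hmem)).2.2
      obtain ⟨x, y, hmid⟩ := midFold zt' [] z0 c W0 (z0 :: c :: zt') (by simp)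
        (hzs ▸ hchain) h0z0 hL1
      have hinit : ((([] : List Int).length : Int) + 1) = (1 : Int) := by simp
      rw [hinit] at hmid
      rw [← hGc] at hmid
      rw [hmid]
  -- shape of port B
  have hB : nearest_null_alt houses num_houses
      = (PySem.List.pyRange 0 (t : Int) 1).map (fun i => py_min_abs i zs)
          ++ houses.drop t := by
    simp only [nearest_null_alt]
    rw [← hzsdef, if_neg hne, PySem.List.slice_from houses (by omega), hnum]
    rw [Int.toNat_natCast]
  rw [hA, hB]
  apply List.ext_getElem?
  intro k
  have hlenW0 : W0.length = houses.length := by rw [hW0, wrFold_length]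
  have hlenF : (fillSeg z0 zt W0).length = houses.length := by
    rw [fillSeg_length, hlenW0]
  have hz0G : z0 ≤ G := hzG z0 hz0mem
  by_cases hkt : k < t
  · -- k is one of the processed plots
    have hkl : k < houses.length := by omega
    rw [List.getElem?_append_left (by
      rw [List.length_map, PySem.List.length_pyRange_one]
      omega)]
    rw [PySem.List.getElem?_map_pyRange_zero _ t k hkt]
    by_cases h1 : (k : Int) < z0
    · -- before the first zero
      rw [wrFold_out _ _ _ _ _ (by omega) (Or.inl (by omega)),
        fillSeg_out zt z0 W0 k hchain' h0z0 (Or.inl (by omega)),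
        hW0, wrFold_in _ _ _ _ _ le_rfl (by omega) (by omega) hkl]
      congr 1
      refine (py_min_abs_spec _ _ _ hne ⟨z0, hz0mem, ?_⟩ ?_).symm
      · rw [abs_of_neg (by omega)]
        ring
      · intro z hz
        have := hz0le z hz
        rcases abs_cases ((k : Int) - z) with ⟨he, _⟩ | ⟨he, _⟩ <;> omega
    · by_cases h2 : (k : Int) ∈ zs
      · -- an empty plot keeps its 0
        rw [wrFold_out _ _ _ _ _ (by omega) (Or.inl (by have := hzG _ h2; omega)),
          fillSeg_out zt z0 W0 k hchain' h0z0 (Or.inr (Or.inr (hzs ▸ h2))),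
          hW0, wrFold_out _ _ _ _ _ le_rfl (Or.inr (by have := hz0le _ h2; omega))]
        have hv := hvalz _ h2
        rw [Int.toNat_natCast] at hv
        rw [hv]
        congr 1
        refine (py_min_abs_spec _ _ _ hne ⟨(k : Int), h2, by simp⟩ ?_).symm
        intro z hz
        exact abs_nonneg _
      · by_cases h3 : (k : Int) < G
        · -- strictly between two zeros
          have hz0k : z0 < (k : Int) := by
            have : (k : Int) ≠ z0 := fun hc => h2 (hc ▸ hz0mem)
            omega
          rw [wrFold_out _ _ _ _ _ (by omega) (Or.inl (by omega))]
          obtain ⟨p, q, hp1, hq1, hpk, hkq, hval, hbound⟩ :=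
            fillSeg_in zt z0 W0 k hchain' h0z0 (by omega) hz0k (by rw [← hG]; exact h3)
              (by rw [← hzs]; exact h2)
          rw [hval]
          congr 1
          have hpz : p ∈ zs := by rw [hzs]; exact hp1
          have hqz : q ∈ zs := by rw [hzs]; exact hq1
          refine (py_min_abs_spec _ _ _ hne ?_ ?_).symm
          · rcases le_total ((k : Int) - p) (q - (k : Int)) with hle | hle
            · exact ⟨p, hpz, by rw [abs_of_pos (by omega)]; omega⟩
            · exact ⟨q, hqz, by rw [abs_of_neg (by omega)]; omega⟩
          · intro z hz
            rcases hbound z (hzs ▸ hz) with hc | hc <;>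
              rcases abs_cases ((k : Int) - z) with ⟨he, _⟩ | ⟨he, _⟩ <;> omega
        · -- after the last zero
          have hGk : G < (k : Int) := by
            have : (k : Int) ≠ G := fun hc => h2 (hc ▸ hGmem)
            omega
          rw [wrFold_in _ _ _ _ _ (by omega) (by omega) (by omega) (by omega)]
          congr 1
          refine (py_min_abs_spec _ _ _ hne ⟨G, hGmem, by rw [abs_of_pos (by omega)]⟩ ?_).symm
          intro z hz
          have := hzG z hz
          rcases abs_cases ((k : Int) - z) with ⟨he, _⟩ | ⟨he, _⟩ <;> omega
  · -- untouched suffix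
    rw [List.getElem?_append_right (by
      rw [List.length_map, PySem.List.length_pyRange_one]
      omega)]
    have hlm : ((PySem.List.pyRange 0 (t : Int) 1).map (fun i => py_min_abs i zs)).length = t := by
      rw [List.length_map, PySem.List.length_pyRange_one]
      omega
    rw [hlm, List.getElem?_drop]
    have hkk : t + (k - t) = k := by omega
    rw [hkk]
    rw [wrFold_out _ _ _ _ _ (by omega) (Or.inr (by omega)),
      fillSeg_out zt z0 W0 k hchain' h0z0 (Or.inr (Or.inl (by rw [← hG]; omega))),
      hW0, wrFold_out _ _ _ _ _ le_rfl (Or.inr (by omega))]
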